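-- pv_equiv track=rewrite | github.com/TheShadowish/TECHIN-Task | december8.py | generate_lights_pattern
-- ===== SOURCE A (Python) =====
-- def generate_lights_pattern(n):
--     """
--     Generate an N × N Christmas lights grid pattern.
--
--     Rules for each cell at position (row, col) where row, col start from 1:
--     - If (row + col) is divisible by 15 (both 3 and 5): 'G'
--     - If (row + col) is divisible by 5: 'S'
--     - If (row + col) is divisible by 3: 'T'
--     - Otherwise: '.'
--
--     Args:
--         n: Grid size (positive integer)
--
--     Returns:
--         List of strings representing the grid with border
--
--     Raises:
--         ValueError: If n is not positive
--         TypeError: If n is not numeric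
--     """
--     # Validate input
--     if not isinstance(n, int):
--         raise TypeError("Grid size must be an integer")
--
--     if n <= 0:
--         raise ValueError("Grid size must be positive (greater than 0)")
--
--     grid = []
--
--     # Add top border
--     top_border = '#' * (n * 2 + 3)
--     grid.append(top_border)
--
--     # Generate each row
--     for row in range(1, n + 1):
--         row_str = '# '
--
--         for col in range(1, n + 1):
--             total = row + col
--
--             # Check divisibility rules (check both 3 and 5 first)
--             if total % 15 == 0:  # Divisible by both 3 and 5
--                 row_str += 'G'
--             elif total % 5 == 0:  # Divisible by 5
--                 row_str += 'S'
--             elif total % 3 == 0:  # Divisible by 3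
--                 row_str += 'T'
--             else:  # Not divisible by 3 or 5
--                 row_str += '.'
--
--             # Add space between characters
--             row_str += ' '
--
--         row_str += '#'
--         grid.append(row_str)
--
--     # Add bottom border
--     bottom_border = '#' * (n * 2 + 3)
--     grid.append(bottom_border)
--
--     return grid
-- ===== SOURCE B (Python) =====
-- def generate_lights_pattern(n):
--     if not isinstance(n, int):
--         raise TypeError("Grid size must be an integer")
--     if n <= 0:
--         raise ValueError("Grid size must be positive (greater than 0)")
--     # The symbol of cell (r, c) depends only on (r + c) % 15, so whole rows
--     # repeat with period 15: build the (at most 15) distinct row lines once,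
--     # then the grid is just references into that table.
--     cycle = ['G' if t % 15 == 0 else 'S' if t % 5 == 0 else 'T' if t % 3 == 0 else '.'
--              for t in range(15)]
--     lines = ['# ' + ' '.join(cycle[(k + c) % 15] for c in range(1, n + 1)) + ' #'
--              for k in range(15)]
--     border = '#' * (2 * n + 3)
--     return [border] + [lines[r % 15] for r in range(1, n + 1)] + [border]
-- ===== Notes on version B (the rewrite author's own statement) =====
-- stated objective: faster
-- what changed: B exploits that the cell symbol depends only on (row+col) mod 15, so rows repeat with period 15: it builds the at most 15 distinct row strings once (via a 15-entry symbol cycle and join) and emits the n rows as lookups into that table, instead of A's per-cell divisibility tests with quadratic string concatenation.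
import Mathlib
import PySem

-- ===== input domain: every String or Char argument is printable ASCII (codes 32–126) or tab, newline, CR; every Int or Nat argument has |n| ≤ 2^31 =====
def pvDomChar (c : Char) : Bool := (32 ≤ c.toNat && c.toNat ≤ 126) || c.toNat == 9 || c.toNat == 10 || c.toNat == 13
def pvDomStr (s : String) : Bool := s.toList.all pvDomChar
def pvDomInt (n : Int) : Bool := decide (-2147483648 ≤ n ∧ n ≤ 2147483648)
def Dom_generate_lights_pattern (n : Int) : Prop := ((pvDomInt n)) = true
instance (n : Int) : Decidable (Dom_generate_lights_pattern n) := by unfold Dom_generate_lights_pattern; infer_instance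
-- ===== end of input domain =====

-- B uses the period-15 structure of the pattern: rows repeat every 15, so it builds at most 15
-- distinct row strings once and emits the grid as table lookups; A recomputes every cell. Objective: faster (asymptotic).

-- ===== PORT A =====
-- row_str is kept as a List Char and packed with String.ofList at append time,
-- exactly following A's concatenation steps.
def generate_lights_pattern (n : Int) : List String :=
  let topBorder := String.ofList (List.replicate (n * 2 + 3).toNat '#')
  let grid : List String := [topBorder]
  let grid := (PySem.List.pyRange 1 (n + 1) 1).foldl (fun g row =>
    let rowStr : List Char :=
      (PySem.List.pyRange 1 (n + 1) 1).foldl (fun rs col =>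
        let total := row + col
        let rs := rs ++
          (if PySem.Int.mod total 15 = 0 then ['G']
           else if PySem.Int.mod total 5 = 0 then ['S']
           else if PySem.Int.mod total 3 = 0 then ['T']
           else ['.'])
        rs ++ [' ']) ['#', ' ']
    g ++ [String.ofList (rowStr ++ ['#'])]) grid
  let bottomBorder := String.ofList (List.replicate (n * 2 + 3).toNat '#')
  grid ++ [bottomBorder]

-- ===== PORT B =====
-- Python's conditional expression in the cycle comprehension
def pvCell (t : Int) : List Char :=
  if PySem.Int.mod t 15 = 0 then ['G']
  else if PySem.Int.mod t 5 = 0 then ['S']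
  else if PySem.Int.mod t 3 = 0 then ['T']
  else ['.']

def pvCycle : List (List Char) := (PySem.List.pyRange 0 15 1).map pvCell

def pvLine (n k : Int) : String :=
  String.ofList (['#', ' '] ++
    PySem.Chars.join [' ']
      ((PySem.List.pyRange 1 (n + 1) 1).map
        (fun c => PySem.List.pyGetD pvCycle (PySem.Int.mod (k + c) 15) [])) ++
    [' ', '#'])

def generate_lights_pattern_alt (n : Int) : List String :=
  let lines := (PySem.List.pyRange 0 15 1).map (pvLine n)
  let border := String.ofList (List.replicate (2 * n + 3).toNat '#')
  [border] ++
    (PySem.List.pyRange 1 (n + 1) 1).map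
      (fun r => PySem.List.pyGetD lines (PySem.Int.mod r 15) "") ++
    [border]

-- ===== PRECONDITION & SPEC =====
-- A raises TypeError/ValueError exactly when n is not a positive integer; Pre_ keeps n positive.
def Pre_generate_lights_pattern (n : Int) : Prop := 0 < n
instance (n : Int) : Decidable (Pre_generate_lights_pattern n) := by unfold Pre_generate_lights_pattern; infer_instance
def pvWitness_generate_lights_pattern : Int := (3)

def Spec_generate_lights_pattern (n : Int) (out : List String) : Prop := out = generate_lights_pattern_alt n
instance (n : Int) (out : List String) : Decidable (Spec_generate_lights_pattern n out) := by unfold Spec_generate_lights_pattern; infer_instance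

-- ===== CLAIM =====
def Claim_equal_generate_lights_pattern : Prop := ∀ (n : Int), Dom_generate_lights_pattern n → Pre_generate_lights_pattern n → Spec_generate_lights_pattern n (generate_lights_pattern n)

-- ===== LEMMAS AND PROOFS =====

-- the cell symbol is 15-periodic in the diagonal sum
lemma pv_cell_period (t : Int) : pvCell (PySem.Int.mod t 15) = pvCell t := by
  have e15 : ∀ a : Int, PySem.Int.mod a 15 = a % 15 := fun a => PySem.Int.mod_eq_emod_of_pos (by norm_num)
  have e5 : ∀ a : Int, PySem.Int.mod a 5 = a % 5 := fun a => PySem.Int.mod_eq_emod_of_pos (by norm_num)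
  have e3 : ∀ a : Int, PySem.Int.mod a 3 = a % 3 := fun a => PySem.Int.mod_eq_emod_of_pos (by norm_num)
  unfold pvCell
  simp only [e15, e5, e3]
  split_ifs <;> first | rfl | omega

-- cycle lookup at any diagonal sum, shifted by a residue, is the cell at the true sum
lemma pv_cycle_lookup (r c : Int) :
    PySem.List.pyGetD pvCycle (PySem.Int.mod (PySem.Int.mod r 15 + c) 15) [] = pvCell (r + c) := by
  have h0 : 0 ≤ PySem.Int.mod (PySem.Int.mod r 15 + c) 15 :=
    PySem.Int.mod_nonneg _ (by norm_num)
  have hlt : PySem.Int.mod (PySem.Int.mod r 15 + c) 15 < 15 :=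
    PySem.Int.mod_lt _ (by norm_num)
  unfold pvCycle
  rw [PySem.List.pyGetD_map_pyRange_of_nonneg pvCell 15 _ [] h0 hlt]
  have hshift : PySem.Int.mod (PySem.Int.mod r 15 + c) 15 = PySem.Int.mod (r + c) 15 := by
    simp only [PySem.Int.mod_eq_emod_of_pos (by norm_num : (0:Int) < 15)]
    omega
  rw [hshift, pv_cell_period]

-- a nonempty list of cells: appending each cell plus a space equals join-by-space plus one trailing space
lemma pv_flat_join (cs : List (List Char)) (h : cs ≠ []) :
    cs.flatMap (fun c => c ++ [' ']) = PySem.Chars.join [' '] cs ++ [' '] := by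
  induction cs with
  | nil => simp at h
  | cons c cs ih =>
    cases cs with
    | nil => simp [PySem.Chars.join_singleton]
    | cons c' cs' =>
      rw [List.flatMap_cons, ih (by simp), PySem.Chars.join_cons_cons]
      simp

-- A's row string equals B's precomputed line at residue row % 15
lemma pv_row (n row : Int) (hn : 0 < n) :
    String.ofList
      (((PySem.List.pyRange 1 (n + 1) 1).foldl (fun rs col =>
          rs ++
            ((if PySem.Int.mod (row + col) 15 = 0 then ['G']
              else if PySem.Int.mod (row + col) 5 = 0 then ['S']
              else if PySem.Int.mod (row + col) 3 = 0 then ['T']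
              else ['.']) ++ [' '])) ['#', ' ']) ++ ['#'])
    = pvLine n (PySem.Int.mod row 15) := by
  have h1 : (fun (rs : List Char) (col : Int) =>
      rs ++
        ((if PySem.Int.mod (row + col) 15 = 0 then ['G']
          else if PySem.Int.mod (row + col) 5 = 0 then ['S']
          else if PySem.Int.mod (row + col) 3 = 0 then ['T']
          else ['.']) ++ [' '])) = fun rs col => rs ++ (pvCell (row + col) ++ [' ']) := by
    funext rs col
    simp [pvCell]
  rw [h1, PySem.List.foldl_append_eq_flatMap]
  unfold pvLine
  have h2 : (PySem.List.pyRange 1 (n + 1) 1).map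
        (fun c => PySem.List.pyGetD pvCycle (PySem.Int.mod (PySem.Int.mod row 15 + c) 15) [])
      = (PySem.List.pyRange 1 (n + 1) 1).map (fun c => pvCell (row + c)) := by
    apply List.map_congr_left
    intro c _
    exact pv_cycle_lookup row c
  rw [h2]
  have h3 : (PySem.List.pyRange 1 (n + 1) 1).flatMap (fun col => pvCell (row + col) ++ [' '])
      = ((PySem.List.pyRange 1 (n + 1) 1).map (fun c => pvCell (row + c))).flatMap
          (fun c => c ++ [' ']) := by
    simp [List.flatMap_map]
  have hne : (PySem.List.pyRange 1 (n + 1) 1).map (fun c => pvCell (row + c)) ≠ [] := by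
    rw [PySem.List.pyRange_one_cons (by omega : (1 : Int) < n + 1)]
    simp
  rw [h3, pv_flat_join _ hne]
  simp [List.append_assoc]

-- ===== VERDICT =====
theorem generate_lights_pattern_spec : Claim_equal_generate_lights_pattern := by
  intro n _ hpre
  have hpre' : (0 : Int) < n := hpre
  unfold Spec_generate_lights_pattern generate_lights_pattern generate_lights_pattern_alt
  simp only [PySem.List.foldl_append_singleton_eq_map]
  have hb : n * 2 + 3 = 2 * n + 3 := by ring
  rw [hb]
  simp only [List.append_assoc]
  congr 1
  congr 1
  apply List.map_congr_left
  intro row hrow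
  rw [pv_row n row hpre']
  have h0 : 0 ≤ PySem.Int.mod row 15 := PySem.Int.mod_nonneg _ (by norm_num)
  have hlt : PySem.Int.mod row 15 < 15 := PySem.Int.mod_lt _ (by norm_num)
  rw [PySem.List.pyGetD_map_pyRange_of_nonneg (pvLine n) 15 _ "" h0 hlt]
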